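-- pv_equiv track=rewrite | github.com/TrevorRSimmons/d_rad_codon_optimizer | drad_codon_optimizer/optimizer.py | optimize_codons_dna
-- ===== SOURCE A (Python) =====
-- def validate_dna_sequence(sequence):
--     valid_nucleotides = set("ATGCatgc")
--     return all(nucleotide in valid_nucleotides for nucleotide in sequence)
--
-- def translate_codon(codon):
--     translation_table = {
--         'GCT': 'A', 'GCC': 'A', 'GCA': 'A', 'GCG': 'A',
--         'GGT': 'G', 'GGC': 'G', 'GGG': 'G', 'GGA': 'G',
--         'CCT': 'P', 'CCC': 'P', 'CCG': 'P', 'CCA': 'P',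
--         'ACT': 'T', 'ACC': 'T', 'ACG': 'T', 'ACA': 'T',
--         'GTT': 'V', 'GTC': 'V', 'GTG': 'V', 'GTA': 'V',
--         'TCT': 'S', 'TCC': 'S', 'TCG': 'S', 'TCA': 'S', 'AGT': 'S', 'AGC': 'S',
--         'CGT': 'R', 'CGC': 'R', 'CGG': 'R', 'CGA': 'R', 'AGG': 'R', 'AGA': 'R',
--         'CTT': 'L', 'CTC': 'L', 'CTG': 'L', 'CTA': 'L', 'TTG': 'L', 'TTA': 'L',
--         'TTT': 'F', 'TTC': 'F',
--         'AAT': 'N', 'AAC': 'N',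
--         'AAG': 'K', 'AAA': 'K',
--         'GAT': 'D', 'GAC': 'D',
--         'GAG': 'E', 'GAA': 'E',
--         'CAT': 'H', 'CAC': 'H',
--         'CAG': 'Q', 'CAA': 'Q',
--         'ATT': 'I', 'ATC': 'I', 'ATA': 'I',
--         'ATG': 'M',
--         'TAT': 'Y', 'TAC': 'Y',
--         'TGT': 'C', 'TGC': 'C',
--         'TGG': 'W',
--         'TAG': '*', 'TAA': '*', 'TGA': '*',
--     }
--     return translation_table.get(codon, '')
--
-- def optimize_codons_dna(dna_sequence, codon_usage_table):
--     if not validate_dna_sequence(dna_sequence):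
--         raise ValueError("Invalid DNA sequence. Only A, T, G, and C allowed.")
--
--     optimized_sequence = ""
--
--     for i in range(0, len(dna_sequence), 3):
--         codon = dna_sequence[i:i+3]
--         if len(codon) != 3:
--             continue
--
--         amino_acid = translate_codon(codon.upper())
--
--         if amino_acid == '*':
--             optimized_sequence += codon.upper()
--         elif amino_acid in codon_usage_table:
--             optimal_codon = max(codon_usage_table[amino_acid],
--                                 key=codon_usage_table[amino_acid].get)
--             optimized_sequence += optimal_codon
--         else:
--             optimized_sequence += codon.upper()
--
--     return optimized_sequence
-- ===== SOURCE B (Python) =====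
-- _BASES = "TCAG"
-- # Standard genetic code as a 64-char string indexed by base-4 codon index (T=0,C=1,A=2,G=3)
-- _CODE = "FFLLSSSSYY**CC*WLLLLPPPPHHQQRRRRIIIMTTTTNNKKSSRRVVVVAAAADDEEGGGG"
--
--
-- def _aa(codon):
--     idx = 0
--     for ch in codon:
--         k = _BASES.find(ch)
--         if k < 0:
--             return ''
--         idx = idx * 4 + k
--     return _CODE[idx]
--
--
-- def optimize_codons_dna(dna_sequence, codon_usage_table):
--     if not all(ch in "ATGCatgc" for ch in dna_sequence):
--         raise ValueError("Invalid DNA sequence. Only A, T, G, and C allowed.")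
--
--     # precompute the optimal codon once per amino acid in the usage table
--     best = {}
--     for aa in codon_usage_table:
--         usage = codon_usage_table[aa]
--         if usage:
--             best[aa] = max(usage, key=usage.get)
--
--     # single pass over the full codons, emitting the precomputed choice
--     pieces = []
--     for i in range(0, len(dna_sequence) - 2, 3):
--         codon = dna_sequence[i:i + 3].upper()
--         aa = _aa(codon)
--         if aa != '*' and aa in best:
--             pieces.append(best[aa])
--         else:
--             pieces.append(codon)
--     return ''.join(pieces)
-- ===== Notes on version B (the rewrite author's own statement) =====
-- stated objective: faster
-- what changed: B stores the genetic code as a 64-character string indexed by a base-4 codon index instead of a 64-entry dict, precomputes each amino acid's optimal codon once per usage-table entry instead of rescanning max(usage, key=usage.get) for every codon, and emits the result with a single join over range(0, len-2, 3).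
import Mathlib
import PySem

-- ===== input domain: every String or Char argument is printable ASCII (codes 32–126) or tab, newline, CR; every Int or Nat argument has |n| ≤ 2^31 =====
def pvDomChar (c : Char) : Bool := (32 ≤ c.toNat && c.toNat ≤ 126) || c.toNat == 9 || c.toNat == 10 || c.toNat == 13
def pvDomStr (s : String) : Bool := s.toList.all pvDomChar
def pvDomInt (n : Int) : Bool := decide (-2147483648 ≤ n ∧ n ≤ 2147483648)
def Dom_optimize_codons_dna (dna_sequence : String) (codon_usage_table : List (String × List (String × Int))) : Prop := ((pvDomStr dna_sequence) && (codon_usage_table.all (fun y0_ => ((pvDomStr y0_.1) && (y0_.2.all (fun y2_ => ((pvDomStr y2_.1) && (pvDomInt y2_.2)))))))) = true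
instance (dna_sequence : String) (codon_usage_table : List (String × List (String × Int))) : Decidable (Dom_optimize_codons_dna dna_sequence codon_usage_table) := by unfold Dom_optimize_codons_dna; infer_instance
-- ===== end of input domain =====

-- B stores the genetic code as one 64-char string indexed by a base-4 codon index and
-- precomputes each amino acid's optimal codon once per usage-table entry instead of
-- rescanning max() per codon (objective: faster).

-- ===== PORT A =====
def validate_dna_sequence (sequence : String) : Bool :=
  let valid_nucleotides := PySem.Set.ofList "ATGCatgc".toList
  sequence.toList.all (fun nucleotide => valid_nucleotides.contains nucleotide)

def pvTranslationTable : List (String × String) :=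
  [("GCT", "A"), ("GCC", "A"), ("GCA", "A"), ("GCG", "A"),
   ("GGT", "G"), ("GGC", "G"), ("GGG", "G"), ("GGA", "G"),
   ("CCT", "P"), ("CCC", "P"), ("CCG", "P"), ("CCA", "P"),
   ("ACT", "T"), ("ACC", "T"), ("ACG", "T"), ("ACA", "T"),
   ("GTT", "V"), ("GTC", "V"), ("GTG", "V"), ("GTA", "V"),
   ("TCT", "S"), ("TCC", "S"), ("TCG", "S"), ("TCA", "S"), ("AGT", "S"), ("AGC", "S"),
   ("CGT", "R"), ("CGC", "R"), ("CGG", "R"), ("CGA", "R"), ("AGG", "R"), ("AGA", "R"),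
   ("CTT", "L"), ("CTC", "L"), ("CTG", "L"), ("CTA", "L"), ("TTG", "L"), ("TTA", "L"),
   ("TTT", "F"), ("TTC", "F"),
   ("AAT", "N"), ("AAC", "N"),
   ("AAG", "K"), ("AAA", "K"),
   ("GAT", "D"), ("GAC", "D"),
   ("GAG", "E"), ("GAA", "E"),
   ("CAT", "H"), ("CAC", "H"),
   ("CAG", "Q"), ("CAA", "Q"),
   ("ATT", "I"), ("ATC", "I"), ("ATA", "I"),
   ("ATG", "M"),
   ("TAT", "Y"), ("TAC", "Y"),
   ("TGT", "C"), ("TGC", "C"),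
   ("TGG", "W"),
   ("TAG", "*"), ("TAA", "*"), ("TGA", "*")]

def translate_codon (codon : String) : String :=
  (PySem.Dict.ofList pvTranslationTable).getD codon ""

-- max(usage, key=usage.get): iterate the dict's keys, compare by looked-up count
-- (the same expression occurs verbatim in A and in B)
def optimal_codon_of (usage : List (String × Int)) : String :=
  (PySem.List.max? (PySem.Dict.mk usage).keys
    (fun k => (PySem.Dict.mk usage).getD k 0)).getD ""

def optimize_codons_dna (dna_sequence : String) (codon_usage_table : List (String × List (String × Int))) : String :=
  if !(validate_dna_sequence dna_sequence) then ""   -- Python: raise ValueError (excluded by Pre_)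
  else
    String.ofList ((PySem.List.pyRange 0 (PySem.Str.len dna_sequence) 3).foldl
      (fun (acc : List Char) i =>
        let codon := PySem.Str.slice dna_sequence (some i) (some (i + 3))
        if PySem.Str.len codon ≠ 3 then acc        -- continue
        else
          let amino_acid := translate_codon (PySem.Str.upper codon)
          if amino_acid == "*" then acc ++ (PySem.Str.upper codon).toList
          else
            match (PySem.Dict.mk codon_usage_table).get? amino_acid with
            | some usage => acc ++ (optimal_codon_of usage).toList   -- max() raises on empty usage: excluded by Pre_
            | none => acc ++ (PySem.Str.upper codon).toList) [])

-- ===== PORT B =====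
def pvBases : String := "TCAG"
-- the standard genetic code as a 64-char string indexed by base-4 codon index
def pvCode : String := "FFLLSSSSYY**CC*WLLLLPPPPHHQQRRRRIIIMTTTTNNKKSSRRVVVVAAAADDEEGGGG"

-- Source B's _aa loop: idx = idx*4 + _BASES.find(ch), early '' on an unknown base
def pvIdx : List Char → Int → Option Int
  | [], idx => some idx
  | ch :: rest, idx =>
    let k := PySem.Str.find pvBases (String.ofList [ch])
    if k < 0 then none else pvIdx rest (idx * 4 + k)

def pvAA (codon : String) : String :=
  match pvIdx codon.toList 0 with
  | none => ""
  | some idx =>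
    match PySem.Str.pyGet? pvCode idx with
    | some c => String.ofList [c]
    | none => ""   -- unreachable for the ≤3-char codons _aa receives (idx < 64)

def optimize_codons_dna_alt (dna_sequence : String) (codon_usage_table : List (String × List (String × Int))) : String :=
  if !(dna_sequence.toList.all (fun ch => "ATGCatgc".toList.contains ch)) then ""   -- Python: raise ValueError (excluded by Pre_)
  else
    let d := PySem.Dict.mk codon_usage_table
    let best := d.keys.foldl
      (fun (best : PySem.Dict String String) aa =>
        match d.get? aa with
        | some usage =>
          if !usage.isEmpty then best.insert aa (optimal_codon_of usage) else best
        | none => best)   -- unreachable: aa ranges over d's own keys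
      PySem.Dict.empty
    let pieces := (PySem.List.pyRange 0 (PySem.Str.len dna_sequence - 2) 3).map
      (fun i =>
        let codon := PySem.Str.upper (PySem.Str.slice dna_sequence (some i) (some (i + 3)))
        let aa := pvAA codon
        if aa != "*" && best.contains aa then best.getD aa "" else codon)
    PySem.Str.join "" pieces

-- ===== PRECONDITION & SPEC =====
-- cheap helpers for Pre_ (pvTranslationTable has no duplicate keys, so a first-match
-- scan computes the same amino acid as translate_codon's dict lookup)
def pvTranslate (codon : String) : String :=
  ((pvTranslationTable.find? (fun p => p.1 == codon)).map (fun p => p.2)).getD ""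

def pvAAOk (codon_usage_table : List (String × List (String × Int))) (aa : String) : Bool :=
  aa == "*" || ((PySem.Dict.mk codon_usage_table).get? aa).all (fun usage => !usage.isEmpty)

def pvCodonOk (codon_usage_table : List (String × List (String × Int))) (codon : String) : Bool :=
  if PySem.Str.len codon = 3 then pvAAOk codon_usage_table (pvTranslate (PySem.Str.upper codon))
  else true

-- Pre_ excludes exactly the inputs where the Python raises: an invalid DNA string
-- (ValueError), and a full non-stop codon whose amino acid has an EMPTY usage dict
-- (max() over an empty sequence raises ValueError).
def Pre_optimize_codons_dna (dna_sequence : String) (codon_usage_table : List (String × List (String × Int))) : Prop :=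
  validate_dna_sequence dna_sequence = true ∧
  ((PySem.List.pyRange 0 (PySem.Str.len dna_sequence) 3).all (fun i =>
    pvCodonOk codon_usage_table (PySem.Str.slice dna_sequence (some i) (some (i + 3))))) = true

instance (dna_sequence : String) (codon_usage_table : List (String × List (String × Int))) : Decidable (Pre_optimize_codons_dna dna_sequence codon_usage_table) := by unfold Pre_optimize_codons_dna; infer_instance

def pvWitness_optimize_codons_dna : String × (List (String × List (String × Int))) :=
  ("", [("M", [("ATG", 1)])])

def Spec_optimize_codons_dna (dna_sequence : String) (codon_usage_table : List (String × List (String × Int))) (out : String) : Prop := out = optimize_codons_dna_alt dna_sequence codon_usage_table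
instance (dna_sequence : String) (codon_usage_table : List (String × List (String × Int))) (out : String) : Decidable (Spec_optimize_codons_dna dna_sequence codon_usage_table out) := by unfold Spec_optimize_codons_dna; infer_instance

-- ===== CLAIM (what is proved, stated in full; the proofs are below) =====
def Claim_equal_optimize_codons_dna : Prop := ∀ (dna_sequence : String) (codon_usage_table : List (String × List (String × Int))), Dom_optimize_codons_dna dna_sequence codon_usage_table → Pre_optimize_codons_dna dna_sequence codon_usage_table → Spec_optimize_codons_dna dna_sequence codon_usage_table (optimize_codons_dna dna_sequence codon_usage_table)


-- ===== LEMMAS AND PROOFS =====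

-- proof-only helpers: named copies of A's loop body pieces
def pvChoice (table : List (String × List (String × Int))) (c : String) : List Char :=
  let aa := translate_codon c
  if aa == "*" then c.toList
  else match (PySem.Dict.mk table).get? aa with
    | some usage => (optimal_codon_of usage).toList
    | none => c.toList

def pvPieceA (dna : String) (table : List (String × List (String × Int))) (i : Int) : List Char :=
  let codon := PySem.Str.slice dna (some i) (some (i + 3))
  if PySem.Str.len codon ≠ 3 then []
  else pvChoice table (PySem.Str.upper codon)

def pvCodon (dna : String) (i : Int) : String :=
  PySem.Str.upper (PySem.Str.slice dna (some i) (some (i + 3)))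

-- named copy of B's dict-building loop body
def pvStepB (table : List (String × List (String × Int))) :
    PySem.Dict String String → String → PySem.Dict String String :=
  fun best aa =>
    match (PySem.Dict.mk table).get? aa with
    | some usage =>
      if !usage.isEmpty then best.insert aa (optimal_codon_of usage) else best
    | none => best

def pvBest (table : List (String × List (String × Int))) : PySem.Dict String String :=
  (PySem.Dict.mk table).keys.foldl (pvStepB table) PySem.Dict.empty

-- named copy of B's emission step
def pvPieceB (dna : String) (table : List (String × List (String × Int))) (i : Int) : String :=
  let codon := pvCodon dna i
  let aa := pvAA codon
  if aa != "*" && (pvBest table).contains aa then (pvBest table).getD aa "" else codon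

theorem pv_A_eq (dna : String) (table : List (String × List (String × Int)))
    (hv : validate_dna_sequence dna = true) :
    optimize_codons_dna dna table =
      String.ofList ((PySem.List.pyRange 0 (PySem.Str.len dna) 3).flatMap (pvPieceA dna table)) := by
  unfold optimize_codons_dna
  rw [hv]
  simp only [Bool.not_true, Bool.false_eq_true, if_false]
  congr 1
  have hfun : (fun (acc : List Char) (i : Int) =>
      let codon := PySem.Str.slice dna (some i) (some (i + 3))
      if PySem.Str.len codon ≠ 3 then acc
      else
        let amino_acid := translate_codon (PySem.Str.upper codon)
        if amino_acid == "*" then acc ++ (PySem.Str.upper codon).toList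
        else
          match (PySem.Dict.mk table).get? amino_acid with
          | some usage => acc ++ (optimal_codon_of usage).toList
          | none => acc ++ (PySem.Str.upper codon).toList)
      = (fun (acc : List Char) (i : Int) => acc ++ pvPieceA dna table i) := by
    funext acc i
    simp only [pvPieceA, pvChoice, ne_eq]
    split_ifs with h hs
    all_goals first
      | exact (List.append_nil acc).symm
      | rfl
      | (cases hg : (PySem.Dict.mk table).get?
            (translate_codon (PySem.Str.upper (PySem.Str.slice dna (some i) (some (i + 3))))) <;>
          simp)
  rw [hfun, PySem.List.foldl_append_eq_flatMap]
  simp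

-- B's validity test computes A's validate_dna_sequence
theorem pv_validate_eq (s : String) :
    (s.toList.all (fun ch => "ATGCatgc".toList.contains ch)) = validate_dna_sequence s := by
  unfold validate_dna_sequence
  have h : PySem.Set.ofList "ATGCatgc".toList = "ATGCatgc".toList := by decide
  rw [h]
  rfl

theorem pv_B_eq (dna : String) (table : List (String × List (String × Int)))
    (hv : validate_dna_sequence dna = true) :
    optimize_codons_dna_alt dna table =
      PySem.Str.join "" ((PySem.List.pyRange 0 (PySem.Str.len dna - 2) 3).map (pvPieceB dna table)) := by
  unfold optimize_codons_dna_alt pvPieceB pvBest pvStepB pvCodon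
  rw [pv_validate_eq dna, hv]
  rfl

theorem pv_join_empty (ls : List (List Char)) : PySem.Chars.join [] ls = ls.flatten := by
  induction ls with
  | nil => simp [PySem.Chars.join_nil]
  | cons p rest ih =>
    cases rest with
    | nil => simp [PySem.Chars.join_singleton]
    | cons q r =>
      rw [PySem.Chars.join_cons_cons]
      simp only [List.flatten_cons]
      rw [ih]
      simp

theorem pv_range3_eq (N : Nat) :
    PySem.List.pyRange 0 (N : Int) 3 = (List.range ((N + 2) / 3)).map (fun k => ((3 * k : Nat) : Int)) := by
  rw [PySem.List.pyRange_of_pos 0 (N : Int) (by norm_num)]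
  have hcount : (if (0 : Int) < (N : Int) then (((N : Int) - 0 + 3 - 1) / 3).toNat else 0) = (N + 2) / 3 := by
    split_ifs with h <;> omega
  rw [hcount]
  apply List.map_congr_left
  intro k _
  push_cast
  ring

theorem pv_rangeB_eq (N : Nat) :
    PySem.List.pyRange 0 ((N : Int) - 2) 3 = (List.range (N / 3)).map (fun k => ((3 * k : Nat) : Int)) := by
  rw [PySem.List.pyRange_of_pos 0 ((N : Int) - 2) (by norm_num)]
  have hcount : (if (0 : Int) < (N : Int) - 2 then (((N : Int) - 2 - 0 + 3 - 1) / 3).toNat else 0) = N / 3 := by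
    split_ifs with h <;> omega
  rw [hcount]
  apply List.map_congr_left
  intro k _
  push_cast
  ring

theorem pv_len_slice3 (dna : String) (j : Nat) :
    PySem.Str.len (PySem.Str.slice dna (some (j : Int)) (some ((j : Int) + 3))) =
      ((min 3 (dna.toList.length - j) : Nat) : Int) := by
  have h3 : ((j : Int) + 3) = ((j : Int) + ((3 : Nat) : Int)) := by norm_cast
  rw [PySem.Str.len_eq, PySem.Str.toList_slice, PySem.Chars.slice_eq_listSlice, h3,
    PySem.List.slice_natCast_add]
  simp [List.length_take, List.length_drop]

-- duplicate-key-robust characterisation of B's precomputed dict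
theorem pv_best_get (table : List (String × List (String × Int))) :
    ∀ (ks : List String) (d : PySem.Dict String String) (aa : String),
      (ks.foldl (pvStepB table) d).get? aa =
        match (PySem.Dict.mk table).get? aa with
        | some u => if aa ∈ ks ∧ u ≠ [] then some (optimal_codon_of u) else d.get? aa
        | none => d.get? aa := by
  intro ks
  induction ks with
  | nil =>
    intro d aa
    cases hg : (PySem.Dict.mk table).get? aa <;> simp
  | cons k rest ih =>
    intro d aa
    rw [List.foldl_cons, ih]
    have hstep_ne : aa ≠ k → (pvStepB table d k).get? aa = d.get? aa := by
      intro hne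
      unfold pvStepB
      cases hgk : (PySem.Dict.mk table).get? k with
      | none => rfl
      | some u =>
        dsimp only
        by_cases hu : u.isEmpty = true
        · simp [hu]
        · rw [Bool.not_eq_true] at hu
          rw [hu]
          simp only [Bool.not_false, if_true]
          exact PySem.Dict.get?_insert_of_ne _ _ hne
    by_cases hk : aa = k
    · subst hk
      cases hg : (PySem.Dict.mk table).get? aa with
      | none =>
        dsimp only
        unfold pvStepB
        rw [hg]
      | some u =>
        dsimp only
        unfold pvStepB
        rw [hg]
        dsimp only
        by_cases hu : u.isEmpty = true
        · have hu' : u = [] := List.isEmpty_iff.mp hu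
          subst hu'
          simp
        · rw [Bool.not_eq_true] at hu
          have hune : u ≠ [] := by simpa [List.isEmpty_eq_false_iff] using hu
          rw [hu]
          simp only [Bool.not_false, if_true]
          by_cases hm : aa ∈ rest
          · rw [if_pos ⟨hm, hune⟩, if_pos ⟨List.mem_cons_self, hune⟩]
          · rw [if_neg (by tauto), PySem.Dict.get?_insert_self,
              if_pos ⟨List.mem_cons_self, hune⟩]
    · have hs := hstep_ne hk
      cases hg : (PySem.Dict.mk table).get? aa with
      | none => dsimp only; exact hs
      | some u =>
        dsimp only
        rw [hs]
        by_cases hm : aa ∈ rest ∧ u ≠ []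
        · rw [if_pos hm, if_pos ⟨List.mem_cons_of_mem _ hm.1, hm.2⟩]
        · rw [if_neg hm, if_neg (by rw [List.mem_cons]; tauto)]

-- A's dict lookup of the constant translation table is the first-match scan pvTranslate
theorem pv_getD_mk_find (l : List (String × String)) (c : String) :
    (PySem.Dict.mk l).getD c "" = ((l.find? (fun p => p.1 == c)).map (fun p => p.2)).getD "" := by
  rw [PySem.Dict.getD_eq_get?_getD]
  induction l with
  | nil => rfl
  | cons p rest ih =>
    rw [PySem.Dict.get?_mk_cons]
    by_cases h : p.1 == c
    · simp [List.find?_cons_of_pos, h]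
    · rw [List.find?_cons_of_neg (by simp_all)]
      simp only [h, Bool.false_eq_true, if_false]
      exact ih

set_option maxRecDepth 10000 in
theorem pv_ofList_eq_mk : PySem.Dict.ofList pvTranslationTable = PySem.Dict.mk pvTranslationTable := by decide

theorem pv_translate_eq_pvTranslate (c : String) : translate_codon c = pvTranslate c := by
  unfold translate_codon pvTranslate
  rw [pv_ofList_eq_mk, pv_getD_mk_find]

-- the two genetic-code encodings agree on all 64 upper-case codons (finite check)
set_option maxRecDepth 10000 in
theorem pv_code64 : ∀ x ∈ "ATGC".toList, ∀ y ∈ "ATGC".toList, ∀ z ∈ "ATGC".toList,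
    pvTranslate (String.ofList [x, y, z]) = pvAA (String.ofList [x, y, z]) := by
  have h : ("ATGC".toList.all fun x => "ATGC".toList.all fun y => "ATGC".toList.all fun z =>
      pvTranslate (String.ofList [x, y, z]) == pvAA (String.ofList [x, y, z])) = true := by decide
  intro x hx y hy z hz
  have hx' := List.all_eq_true.mp h x hx
  have hy' := List.all_eq_true.mp hx' y hy
  have hz' := List.all_eq_true.mp hy' z hz
  exact eq_of_beq hz'

set_option maxRecDepth 10000 in
theorem pv_upper_valid : ∀ ch ∈ "ATGCatgc".toList, PySem.Chars.upperChar ch ∈ "ATGC".toList := by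
  have h : ("ATGCatgc".toList.all fun ch => "ATGC".toList.contains (PySem.Chars.upperChar ch)) = true := by decide
  intro ch hch
  simpa using List.all_eq_true.mp h ch hch

-- per-codon agreement on a full codon
set_option maxHeartbeats 1000000 in
theorem pv_piece_eq (dna : String) (table : List (String × List (String × Int))) (k : Nat)
    (hk : k < dna.toList.length / 3)
    (hv : validate_dna_sequence dna = true)
    (hok : pvAAOk table (pvTranslate (pvCodon dna ((3 * k : Nat) : Int))) = true) :
    pvPieceA dna table ((3 * k : Nat) : Int) = (pvPieceB dna table ((3 * k : Nat) : Int)).toList := by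
  have hslice : (PySem.Str.slice dna (some ((3 * k : Nat) : Int)) (some (((3 * k : Nat) : Int) + 3))).toList
      = (dna.toList.drop (3 * k)).take 3 := by
    have h3 : (((3 * k : Nat) : Int) + 3) = (((3 * k : Nat) : Int) + ((3 : Nat) : Int)) := by norm_cast
    rw [PySem.Str.toList_slice, PySem.Chars.slice_eq_listSlice, h3, PySem.List.slice_natCast_add]
  have hlen3 : ((dna.toList.drop (3 * k)).take 3).length = 3 := by
    simp only [List.length_take, List.length_drop]
    omega
  have hlen : PySem.Str.len (PySem.Str.slice dna (some ((3 * k : Nat) : Int)) (some (((3 * k : Nat) : Int) + 3))) = 3 := by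
    rw [PySem.Str.len_eq, hslice, hlen3]
    rfl
  -- the upper-cased codon is three valid upper-case bases
  have hvalid : ∀ ch ∈ (dna.toList.drop (3 * k)).take 3, ch ∈ "ATGCatgc".toList := by
    intro ch hch
    have hmem : ch ∈ dna.toList := List.mem_of_mem_drop (List.mem_of_mem_take hch)
    have hall : (dna.toList.all (fun ch => "ATGCatgc".toList.contains ch)) = true :=
      (pv_validate_eq dna).symm ▸ hv
    simpa using List.all_eq_true.mp hall ch hmem
  have hup : (pvCodon dna ((3 * k : Nat) : Int)).toList
      = ((dna.toList.drop (3 * k)).take 3).map PySem.Chars.upperChar := by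
    unfold pvCodon
    rw [PySem.Str.toList_upper, hslice]
    rfl
  obtain ⟨a, b, c, habc⟩ : ∃ a b c, (dna.toList.drop (3 * k)).take 3 = [a, b, c] := by
    match hx : (dna.toList.drop (3 * k)).take 3, hlen3 with
    | [a, b, c], _ => exact ⟨a, b, c, rfl⟩
  have hcodon : pvCodon dna ((3 * k : Nat) : Int)
      = String.ofList [PySem.Chars.upperChar a, PySem.Chars.upperChar b, PySem.Chars.upperChar c] := by
    have h := congrArg String.ofList hup
    rw [String.ofList_toList, habc] at h
    simpa using h
  have hA : PySem.Chars.upperChar a ∈ "ATGC".toList :=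
    pv_upper_valid a (hvalid a (habc ▸ List.mem_cons_self))
  have hB : PySem.Chars.upperChar b ∈ "ATGC".toList :=
    pv_upper_valid b (hvalid b (habc ▸ List.mem_cons_of_mem _ List.mem_cons_self))
  have hC : PySem.Chars.upperChar c ∈ "ATGC".toList :=
    pv_upper_valid c (hvalid c (habc ▸ List.mem_cons_of_mem _ (List.mem_cons_of_mem _ List.mem_cons_self)))
  have haa : pvAA (pvCodon dna ((3 * k : Nat) : Int)) = pvTranslate (pvCodon dna ((3 * k : Nat) : Int)) := by
    rw [hcodon]
    exact (pv_code64 _ hA _ hB _ hC).symm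
  have htr : translate_codon (pvCodon dna ((3 * k : Nat) : Int)) = pvTranslate (pvCodon dna ((3 * k : Nat) : Int)) :=
    pv_translate_eq_pvTranslate _
  -- now compare the two emitted pieces
  unfold pvPieceA pvChoice pvPieceB
  simp only [ne_eq]
  rw [hlen]
  rw [if_neg (by simp : ¬¬((3 : Int) = 3))]
  show (let aa := translate_codon (pvCodon dna ((3 * k : Nat) : Int));
      if aa == "*" then (pvCodon dna ((3 * k : Nat) : Int)).toList
      else match (PySem.Dict.mk table).get? aa with
        | some usage => (optimal_codon_of usage).toList
        | none => (pvCodon dna ((3 * k : Nat) : Int)).toList) = _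
  dsimp only
  rw [htr, haa]
  set aa := pvTranslate (pvCodon dna ((3 * k : Nat) : Int)) with haadef
  have hbest : (pvBest table).get? aa =
      match (PySem.Dict.mk table).get? aa with
      | some u => if aa ∈ (PySem.Dict.mk table).keys ∧ u ≠ [] then some (optimal_codon_of u) else none
      | none => none := by
    unfold pvBest
    rw [pv_best_get]
    cases hg : (PySem.Dict.mk table).get? aa <;> simp [PySem.Dict.get?_empty]
  by_cases hstar : aa = "*"
  · rw [if_pos (by simp [hstar]), if_neg (by simp [hstar])]
  · rw [if_neg (by simp [hstar])]
    cases hg : (PySem.Dict.mk table).get? aa with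
    | none =>
      have hnone : (pvBest table).get? aa = none := by rw [hbest, hg]
      have hcont : (pvBest table).contains aa = false := by
        rw [PySem.Dict.contains_eq_isSome_get?, hnone]
        rfl
      rw [if_neg (by simp [hcont])]
    | some u =>
      have hune : u ≠ [] := by
        unfold pvAAOk at hok
        rw [hg] at hok
        simp only [Bool.or_eq_true, beq_iff_eq, Option.all_some] at hok
        rcases hok with h1 | h1
        · exact absurd h1 hstar
        · simpa [List.isEmpty_eq_false_iff] using h1
      have hmemk : aa ∈ (PySem.Dict.mk table).keys := by
        rw [← PySem.Dict.contains_iff_mem_keys, PySem.Dict.contains_eq_isSome_get?, hg]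
        rfl
      have hsome : (pvBest table).get? aa = some (optimal_codon_of u) := by
        rw [hbest, hg]
        dsimp only
        rw [if_pos ⟨hmemk, hune⟩]
      have hcont : (pvBest table).contains aa = true := by
        rw [PySem.Dict.contains_eq_isSome_get?, hsome]
        rfl
      rw [if_pos (by simp [hcont, hstar])]
      rw [PySem.Dict.getD_eq_get?_getD, hsome]
      rfl

-- the trailing partial codon contributes nothing on A's side
theorem pv_tail_piece (dna : String) (table : List (String × List (String × Int))) :
    pvPieceA dna table ((3 * (dna.toList.length / 3) : Nat) : Int) = [] := by
  unfold pvPieceA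
  simp only [ne_eq]
  rw [pv_len_slice3 dna (3 * (dna.toList.length / 3))]
  rw [if_pos]
  intro he
  have hmin : min 3 (dna.toList.length - 3 * (dna.toList.length / 3)) = 3 := by exact_mod_cast he
  omega

-- Pre_'s per-codon condition at index 3*k
theorem pv_pre_at (dna : String) (table : List (String × List (String × Int))) (k : Nat)
    (hk : k < dna.toList.length / 3)
    (hpre : ((PySem.List.pyRange 0 (PySem.Str.len dna) 3).all (fun i =>
      pvCodonOk table (PySem.Str.slice dna (some i) (some (i + 3))))) = true) :
    pvAAOk table (pvTranslate (pvCodon dna ((3 * k : Nat) : Int))) = true := by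
  have hmem : ((3 * k : Nat) : Int) ∈ PySem.List.pyRange 0 (PySem.Str.len dna) 3 := by
    rw [PySem.Str.len_eq, PySem.List.mem_pyRange_iff_of_pos (by norm_num)]
    refine ⟨by positivity, by push_cast; omega, by simp⟩
  have h := List.all_eq_true.mp hpre _ hmem
  unfold pvCodonOk at h
  rw [pv_len_slice3 dna (3 * k)] at h
  have hmin : min 3 (dna.toList.length - 3 * k) = 3 := by omega
  rw [hmin] at h
  simpa [pvCodon] using h

-- ===== VERDICT (by name: the statement is the Claim_ definition above) =====
theorem optimize_codons_dna_spec : Claim_equal_optimize_codons_dna := by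
  intro dna table _hdom hpre
  obtain ⟨hv, hall⟩ := hpre
  unfold Spec_optimize_codons_dna
  rw [pv_A_eq dna table hv, pv_B_eq dna table hv]
  apply String.toList_inj.mp
  rw [PySem.Str.toList_join]
  have hsep : ("" : String).toList = [] := rfl
  rw [hsep, pv_join_empty]
  simp only [String.toList_ofList, List.map_map]
  rw [← List.flatMap_def]
  have hlen : PySem.Str.len dna = ((dna.toList.length : Nat) : Int) := by rw [PySem.Str.len_eq]
  rw [hlen, pv_range3_eq dna.toList.length, pv_rangeB_eq dna.toList.length]
  rw [List.flatMap_map, List.flatMap_map]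
  have hmain : ∀ k ∈ List.range (dna.toList.length / 3),
      pvPieceA dna table ((3 * k : Nat) : Int) = (pvPieceB dna table ((3 * k : Nat) : Int)).toList := by
    intro k hkmem
    have hk := List.mem_range.mp hkmem
    exact pv_piece_eq dna table k hk hv (pv_pre_at dna table k hk hall)
  by_cases h3 : dna.toList.length % 3 = 0
  · have hq : (dna.toList.length + 2) / 3 = dna.toList.length / 3 := by omega
    rw [hq]
    simp only [List.flatMap_def]
    exact congrArg List.flatten (List.map_congr_left (by
      intro k hkmem
      simpa using hmain k hkmem))
  · have hq : (dna.toList.length + 2) / 3 = dna.toList.length / 3 + 1 := by omega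
    rw [hq, List.range_succ, List.flatMap_append]
    have htail : (([(dna.toList.length / 3 : Nat)]).flatMap
        (fun k => pvPieceA dna table ((3 * k : Nat) : Int))) = [] := by
      simp only [List.flatMap_cons, List.flatMap_nil, List.append_nil]
      exact pv_tail_piece dna table
    rw [htail, List.append_nil]
    simp only [List.flatMap_def]
    exact congrArg List.flatten (List.map_congr_left (by
      intro k hkmem
      simpa using hmain k hkmem))
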